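-- pv_equiv track=rewrite | github.com/yadieljaquez/Deobfuscator | pol.py | simplify_arithmetic_masks
-- ===== SOURCE A (Python) =====
-- def simplify_arithmetic_masks(code: str) -> str:
--
--     mask_patterns = {
--         r"% 256": "& 0xFF",
--         r"% 65536": "& 0xFFFF",
--         r"% var_4": "& 0xFFFFFFFF"
--     }
--     for pattern, replacement in mask_patterns.items():
--         code = code.replace(pattern, replacement)
--     return code
-- ===== SOURCE B (Python) =====
-- def simplify_arithmetic_masks(code: str) -> str:
--     # One left-to-right pass matching all three mask patterns at once,
--     # instead of three sequential full-string replace scans.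
--     table = (
--         ("% 256", "& 0xFF"),
--         ("% 65536", "& 0xFFFF"),
--         ("% var_4", "& 0xFFFFFFFF"),
--     )
--     out = []
--     i = 0
--     n = len(code)
--     while i < n:
--         for pat, rep in table:
--             if code.startswith(pat, i):
--                 out.append(rep)
--                 i += len(pat)
--                 break
--         else:
--             out.append(code[i])
--             i += 1
--     return "".join(out)
-- ===== Notes on version B (the rewrite author's own statement) =====
-- stated objective: alternative
-- what changed: Replaced the three sequential full-string str.replace passes by a single left-to-right scan that tries all three mask patterns at each position and builds the output in one traversal.
import Mathlib
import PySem

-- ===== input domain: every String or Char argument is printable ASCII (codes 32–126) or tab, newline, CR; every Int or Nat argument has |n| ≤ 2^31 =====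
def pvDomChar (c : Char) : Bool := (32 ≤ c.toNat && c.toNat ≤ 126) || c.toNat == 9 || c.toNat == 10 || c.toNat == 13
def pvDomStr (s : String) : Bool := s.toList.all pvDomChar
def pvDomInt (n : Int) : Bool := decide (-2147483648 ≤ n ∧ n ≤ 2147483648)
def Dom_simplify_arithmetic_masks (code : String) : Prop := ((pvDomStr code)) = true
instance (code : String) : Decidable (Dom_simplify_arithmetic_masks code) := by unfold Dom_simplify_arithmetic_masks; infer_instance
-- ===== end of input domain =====

-- B replaces A's three sequential str.replace passes by one left-to-right scan that
-- matches all three mask patterns at each position (alternative single-pass algorithm).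

-- ===== PORT A =====
def simplify_arithmetic_masks (code : String) : String :=
  -- the dict's three (pattern, replacement) pairs applied by code.replace in insertion order
  let c1 := PySem.Str.replace code "% 256" "& 0xFF"
  let c2 := PySem.Str.replace c1 "% 65536" "& 0xFFFF"
  let c3 := PySem.Str.replace c2 "% var_4" "& 0xFFFFFFFF"
  c3

-- ===== PORT B =====
-- the while-loop of Source B: at each position try the three patterns (startswith), else copy one char
def maskScan : List Char → List Char
  | [] => []
  | c :: t =>
    if ("% 256".toList).isPrefixOf (c :: t) then
      "& 0xFF".toList ++ maskScan ((c :: t).drop 5)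
    else if ("% 65536".toList).isPrefixOf (c :: t) then
      "& 0xFFFF".toList ++ maskScan ((c :: t).drop 7)
    else if ("% var_4".toList).isPrefixOf (c :: t) then
      "& 0xFFFFFFFF".toList ++ maskScan ((c :: t).drop 7)
    else
      c :: maskScan t
termination_by l => l.length
decreasing_by all_goals (simp [List.length_drop]; try omega)

def simplify_arithmetic_masks_alt (code : String) : String :=
  String.ofList (maskScan code.toList)

-- ===== PRECONDITION & SPEC =====
def Spec_simplify_arithmetic_masks (code : String) (out : String) : Prop := out = simplify_arithmetic_masks_alt code
instance (code : String) (out : String) : Decidable (Spec_simplify_arithmetic_masks code out) := by unfold Spec_simplify_arithmetic_masks; infer_instance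

-- ===== CLAIM (what is proved, stated in full; the proofs are below) =====
def Claim_equal_simplify_arithmetic_masks : Prop := ∀ (code : String), Dom_simplify_arithmetic_masks code → Spec_simplify_arithmetic_masks code (simplify_arithmetic_masks code)

-- ===== LEMMAS AND PROOFS =====

-- proof-side model of Python str.replace (non-empty pattern): one scan with prefix tests
def rep (old new : List Char) : List Char → List Char
  | [] => []
  | c :: t =>
    if old.isPrefixOf (c :: t) then new ++ rep old new ((c :: t).drop (max 1 old.length))
    else c :: rep old new t
termination_by l => l.length
decreasing_by all_goals (simp [List.length_drop]; try omega)

lemma rep_nil (old new : List Char) : rep old new [] = [] := by rw [rep]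

lemma rep_cons (old new : List Char) (c : Char) (t : List Char) :
    rep old new (c :: t) =
      if old.isPrefixOf (c :: t) then new ++ rep old new ((c :: t).drop (max 1 old.length))
      else c :: rep old new t := by
  rw [rep]

lemma go_eq_rep (old new : List Char) (hold : old ≠ []) :
    ∀ (fuel : Nat) (l acc : List Char), l.length ≤ fuel →
      PySem.Chars.replace.go old new fuel l acc = acc.reverse ++ rep old new l := by
  intro fuel
  induction fuel with
  | zero =>
    intro l acc hl
    have : l = [] := by cases l <;> simp_all
    subst this
    simp [PySem.Chars.replace.go, rep_nil]
  | succ n ih =>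
    intro l acc hl
    cases l with
    | nil => simp [PySem.Chars.replace.go, rep_nil]
    | cons c t =>
      rw [PySem.Chars.replace.go]
      by_cases hp : old.isPrefixOf (c :: t)
      · have hlen : 1 ≤ old.length := by cases old <;> simp_all
        have hmax : max 1 old.length = old.length := by omega
        rw [if_pos hp, rep_cons, if_pos hp, hmax]
        rw [ih ((c :: t).drop old.length) (new.reverse ++ acc)
          (by simp only [List.length_drop, List.length_cons] at hl ⊢; omega)]
        simp
      · rw [if_neg hp, rep_cons, if_neg hp]
        rw [ih t (c :: acc) (by simp at hl ⊢; omega)]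
        simp

lemma replace_eq_rep (s old new : List Char) (hold : old ≠ []) :
    PySem.Chars.replace s old new = rep old new s := by
  rw [PySem.Chars.replace]
  rw [if_neg (by simp [List.isEmpty_iff, hold])]
  exact go_eq_rep old new hold s.length s [] le_rfl

-- a pattern starting with h never matches at a position inside a block containing no h
lemma rep_append_no_head (h : Char) (o' new u x : List Char) (hu : h ∉ u) :
    rep (h :: o') new (u ++ x) = u ++ rep (h :: o') new x := by
  induction u with
  | nil => simp
  | cons a u ih =>
    have ha : a ≠ h := by intro e; exact hu (by simp [e])
    have hu' : h ∉ u := by intro e; exact hu (by simp [e])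
    rw [List.cons_append, rep_cons, if_neg]
    · rw [ih hu', List.cons_append]
    · simp [List.isPrefixOf]
      intro e; exact absurd e.symm ha

-- a prefix containing no '&' of a rep-output (whose replacement starts with '&') was already there
lemma prefix_rep_no_amp (o nw : List Char) :
    ∀ (w u : List Char), ('&' ∉ w) → w <+: rep o ('&' :: nw) u → w <+: u := by
  intro w
  induction w with
  | nil => intro u _ _; exact List.nil_prefix
  | cons a w ihw =>
    intro u hw hpre
    cases u with
    | nil => rw [rep_nil] at hpre; exact absurd hpre (by simp)
    | cons d u' =>
      rw [rep_cons] at hpre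
      by_cases hp : o.isPrefixOf (d :: u')
      · rw [if_pos hp] at hpre
        have : a = '&' := by
          rcases hpre with ⟨r, hr⟩
          simpa using (congrArg (fun l => l.head?) hr.symm).symm
        exact absurd this (by intro e; exact hw (by simp [e]))
      · rw [if_neg hp] at hpre
        rcases (List.cons_prefix_cons.mp hpre) with ⟨he, htail⟩
        have hw' : '&' ∉ w := by intro e; exact hw (by simp [e])
        exact List.cons_prefix_cons.mpr ⟨he, ihw u' hw' htail⟩

-- the three patterns and replacements as char-list literals
def P1 : List Char := ['%',' ','2','5','6']
def P2 : List Char := ['%',' ','6','5','5','3','6']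
def P3 : List Char := ['%',' ','v','a','r','_','4']
def R1 : List Char := ['&',' ','0','x','F','F']
def R2 : List Char := ['&',' ','0','x','F','F','F','F']
def R3 : List Char := ['&',' ','0','x','F','F','F','F','F','F','F','F']

-- toList of the pattern/replacement string literals
lemma eP1 : "% 256".toList = P1 := by decide
lemma eP2 : "% 65536".toList = P2 := by decide
lemma eP3 : "% var_4".toList = P3 := by decide
lemma eR1 : "& 0xFF".toList = R1 := by decide
lemma eR2 : "& 0xFFFF".toList = R2 := by decide
lemma eR3 : "& 0xFFFFFFFF".toList = R3 := by decide

lemma maskScan_cons (c : Char) (t : List Char) :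
    maskScan (c :: t) =
      if (P1).isPrefixOf (c :: t) then R1 ++ maskScan ((c :: t).drop 5)
      else if (P2).isPrefixOf (c :: t) then R2 ++ maskScan ((c :: t).drop 7)
      else if (P3).isPrefixOf (c :: t) then R3 ++ maskScan ((c :: t).drop 7)
      else c :: maskScan t := by
  rw [maskScan, eP1, eP2, eP3, eR1, eR2, eR3]

-- a pattern consumes itself at the head of the scanned list
lemma rep_consume (a : Char) (o new x : List Char) :
    rep (a :: o) new ((a :: o) ++ x) = new ++ rep (a :: o) new x := by
  have hpre : (a :: o).isPrefixOf (a :: (o ++ x)) = true := by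
    rw [← List.cons_append]
    exact List.isPrefixOf_iff_prefix.mpr (List.prefix_append _ _)
  rw [List.cons_append, rep_cons, if_pos hpre]
  congr 1
  have hmax : max 1 (a :: o).length = (a :: o).length := by simp
  rw [hmax, ← List.cons_append, List.drop_left]

-- pass-through: rep with pattern P1 copies P2 / P3 verbatim, rep with P2 copies P3
lemma rep1_pass_P2 (x : List Char) : rep P1 R1 (P2 ++ x) = P2 ++ rep P1 R1 x := by
  simp only [P1, P2, R1, List.cons_append, List.nil_append]
  rw [rep_cons, if_neg (by simp [List.isPrefixOf])]
  have h := rep_append_no_head '%' [' ','2','5','6'] ['&',' ','0','x','F','F']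
      [' ','6','5','5','3','6'] x (by decide)
  simp only [List.cons_append, List.nil_append] at h
  rw [h]

lemma rep1_pass_P3 (x : List Char) : rep P1 R1 (P3 ++ x) = P3 ++ rep P1 R1 x := by
  simp only [P1, P3, R1, List.cons_append, List.nil_append]
  rw [rep_cons, if_neg (by simp [List.isPrefixOf])]
  have h := rep_append_no_head '%' [' ','2','5','6'] ['&',' ','0','x','F','F']
      [' ','v','a','r','_','4'] x (by decide)
  simp only [List.cons_append, List.nil_append] at h
  rw [h]

lemma rep2_pass_P3 (x : List Char) : rep P2 R2 (P3 ++ x) = P3 ++ rep P2 R2 x := by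
  simp only [P2, P3, R2, List.cons_append, List.nil_append]
  rw [rep_cons, if_neg (by simp [List.isPrefixOf])]
  have h := rep_append_no_head '%' [' ','6','5','5','3','6'] ['&',' ','0','x','F','F','F','F']
      [' ','v','a','r','_','4'] x (by decide)
  simp only [List.cons_append, List.nil_append] at h
  rw [h]

-- replacement blocks contain no '%', so the later patterns step over them
lemma rep2_pass_R1 (x : List Char) : rep P2 R2 (R1 ++ x) = R1 ++ rep P2 R2 x := by
  rw [show (P2 : List Char) = '%' :: [' ','6','5','5','3','6'] from rfl]
  exact rep_append_no_head _ _ _ _ _ (by decide)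

lemma rep3_pass_R1 (x : List Char) : rep P3 R3 (R1 ++ x) = R1 ++ rep P3 R3 x := by
  rw [show (P3 : List Char) = '%' :: [' ','v','a','r','_','4'] from rfl]
  exact rep_append_no_head _ _ _ _ _ (by decide)

lemma rep3_pass_R2 (x : List Char) : rep P3 R3 (R2 ++ x) = R2 ++ rep P3 R3 x := by
  rw [show (P3 : List Char) = '%' :: [' ','v','a','r','_','4'] from rfl]
  exact rep_append_no_head _ _ _ _ _ (by decide)

-- the scanned suffixes of a prefix-match
lemma drop_of_prefix (p r c : List Char) (h : p ++ r = c) : c.drop p.length = r := by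
  rw [← h, List.drop_left]

-- no new match is created at an unmatched position (case 4 of the main induction)
lemma no_new_P2 (c : Char) (t : List Char)
    (h2 : ¬ (P2).isPrefixOf (c :: t) = true) :
    ¬ (P2).isPrefixOf (c :: rep P1 R1 t) = true := by
  intro hq
  apply h2
  have hpre := List.isPrefixOf_iff_prefix.mp hq
  rw [show (P2 : List Char) = '%' :: [' ','6','5','5','3','6'] from rfl] at hpre ⊢
  rcases List.cons_prefix_cons.mp hpre with ⟨he, htail⟩
  have htail' : [' ','6','5','5','3','6'] <+: t := by
    refine prefix_rep_no_amp P1 [' ','0','x','F','F'] _ t (by decide) ?_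
    exact htail
  exact List.isPrefixOf_iff_prefix.mpr (List.cons_prefix_cons.mpr ⟨he, htail'⟩)

lemma no_new_P3 (c : Char) (t : List Char)
    (h3 : ¬ (P3).isPrefixOf (c :: t) = true) :
    ¬ (P3).isPrefixOf (c :: rep P2 R2 (rep P1 R1 t)) = true := by
  intro hq
  apply h3
  have hpre := List.isPrefixOf_iff_prefix.mp hq
  rw [show (P3 : List Char) = '%' :: [' ','v','a','r','_','4'] from rfl] at hpre ⊢
  rcases List.cons_prefix_cons.mp hpre with ⟨he, htail⟩
  have t1 : [' ','v','a','r','_','4'] <+: rep P1 R1 t :=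
    prefix_rep_no_amp P2 [' ','0','x','F','F','F','F'] _ _ (by decide) htail
  have t2 : [' ','v','a','r','_','4'] <+: t :=
    prefix_rep_no_amp P1 [' ','0','x','F','F'] _ _ (by decide) t1
  exact List.isPrefixOf_iff_prefix.mpr (List.cons_prefix_cons.mpr ⟨he, t2⟩)

lemma main_scan (cs : List Char) :
    rep P3 R3 (rep P2 R2 (rep P1 R1 cs)) = maskScan cs := by
  induction cs using maskScan.induct with
  | case1 =>
    rw [maskScan, rep_nil, rep_nil, rep_nil]
  | case2 c t h1 ih =>
    rw [eP1] at h1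
    obtain ⟨r, hr⟩ := List.isPrefixOf_iff_prefix.mp h1
    have hdrop : (c :: t).drop 5 = r := drop_of_prefix P1 r _ hr
    rw [hdrop] at ih
    rw [maskScan_cons, if_pos h1, hdrop, ← hr]
    rw [show (P1 : List Char) = '%' :: [' ','2','5','6'] from rfl]
    rw [rep_consume, rep2_pass_R1, rep3_pass_R1,
        show ('%' :: [' ','2','5','6'] : List Char) = P1 from rfl, ih]
  | case3 c t h1 h2 ih =>
    rw [eP1] at h1; rw [eP2] at h2
    obtain ⟨r, hr⟩ := List.isPrefixOf_iff_prefix.mp h2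
    have hdrop : (c :: t).drop 7 = r := drop_of_prefix P2 r _ hr
    rw [hdrop] at ih
    rw [maskScan_cons, if_neg h1, if_pos h2, hdrop, ← hr]
    rw [rep1_pass_P2]
    rw [show (P2 : List Char) = '%' :: [' ','6','5','5','3','6'] from rfl]
    rw [rep_consume, rep3_pass_R2,
        show ('%' :: [' ','6','5','5','3','6'] : List Char) = P2 from rfl, ih]
  | case4 c t h1 h2 h3 ih =>
    rw [eP1] at h1; rw [eP2] at h2; rw [eP3] at h3
    obtain ⟨r, hr⟩ := List.isPrefixOf_iff_prefix.mp h3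
    have hdrop : (c :: t).drop 7 = r := drop_of_prefix P3 r _ hr
    rw [hdrop] at ih
    rw [maskScan_cons, if_neg h1, if_neg h2, if_pos h3, hdrop, ← hr]
    rw [rep1_pass_P3, rep2_pass_P3]
    rw [show (P3 : List Char) = '%' :: [' ','v','a','r','_','4'] from rfl]
    rw [rep_consume,
        show ('%' :: [' ','v','a','r','_','4'] : List Char) = P3 from rfl, ih]
  | case5 c t h1 h2 h3 ih =>
    rw [eP1] at h1; rw [eP2] at h2; rw [eP3] at h3
    rw [maskScan_cons, if_neg h1, if_neg h2, if_neg h3]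
    rw [rep_cons, if_neg h1]
    rw [rep_cons, if_neg (no_new_P2 c t h2)]
    rw [rep_cons, if_neg (no_new_P3 c t h3)]
    rw [ih]

theorem simplify_arithmetic_masks_spec : Claim_equal_simplify_arithmetic_masks := by
  intro code _
  unfold Spec_simplify_arithmetic_masks simplify_arithmetic_masks simplify_arithmetic_masks_alt
  simp only [PySem.Str.replace, String.toList_ofList]
  rw [replace_eq_rep _ _ _ (by decide), replace_eq_rep _ _ _ (by decide),
      replace_eq_rep _ _ _ (by decide)]
  rw [eP1, eP2, eP3, eR1, eR2, eR3]
  exact congrArg String.ofList (main_scan code.toList)
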